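-- pv_equiv track=rewrite | github.com/OpenParliamentTV/OpenParliamentTV-Parsers | parliaments/DE/parsers/proceedings2json.py | last_speaker_info
-- ===== SOURCE A (Python) =====
-- def last_speaker_info(turns):
--     # Find the last turn item for which speaker is not null
--     # (it may be a comment)
--     sp = [ t
--            for t in turns
--            if t['speaker'] is not None ]
--     if sp:
--         return {
--             'speaker': sp[-1]['speaker'],
--             'speakerstatus': sp[-1]['speakerstatus']
--         }
--     else:
--         return {
--             'speaker': None,
--             'speakerstatus': None
--         }
-- ===== SOURCE B (Python) =====
-- def last_speaker_info(turns):
--     # Scan from the end and return at the first turn with a non-null speaker.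
--     for t in reversed(turns):
--         if t['speaker'] is not None:
--             return {
--                 'speaker': t['speaker'],
--                 'speakerstatus': t['speakerstatus']
--             }
--     return {
--         'speaker': None,
--         'speakerstatus': None
--     }
-- ===== Notes on version B (the rewrite author's own statement) =====
-- stated objective: simpler
-- what changed: Replaces the list comprehension + negative indexing with a single reverse scan that returns at the first turn whose speaker is non-null, building no intermediate list.
import Mathlib
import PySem

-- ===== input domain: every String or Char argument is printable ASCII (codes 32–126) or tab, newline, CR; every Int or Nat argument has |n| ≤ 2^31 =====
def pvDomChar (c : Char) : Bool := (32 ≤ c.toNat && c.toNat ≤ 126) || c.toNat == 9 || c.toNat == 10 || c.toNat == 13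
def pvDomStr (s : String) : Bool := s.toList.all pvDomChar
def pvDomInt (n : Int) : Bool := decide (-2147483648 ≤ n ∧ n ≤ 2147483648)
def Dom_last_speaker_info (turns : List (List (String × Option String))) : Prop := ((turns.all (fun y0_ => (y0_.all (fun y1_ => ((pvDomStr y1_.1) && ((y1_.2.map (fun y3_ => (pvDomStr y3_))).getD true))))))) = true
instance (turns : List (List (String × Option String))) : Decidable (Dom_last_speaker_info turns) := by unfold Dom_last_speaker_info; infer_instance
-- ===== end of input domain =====

-- B replaces the comprehension + sp[-1] with a single reverse scan that returns at the first
-- turn with a non-null speaker (objective: simpler; no intermediate list).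

-- shared helper: "t['speaker'] is not None" (key present with a non-null value)
def hasSpeaker (t : List (String × Option String)) : Bool :=
  match PySem.Dict.get? (PySem.Dict.mk t) "speaker" with
  | some (some _) => true
  | _ => false

-- ===== PORT A =====
def last_speaker_info (turns : List (List (String × Option String))) : List (String × Option String) :=
  let sp := turns.filter hasSpeaker
  if sp ≠ [] then
    match PySem.List.pyGet? sp (-1) with
    | some last =>
        match PySem.Dict.get? (PySem.Dict.mk last) "speakerstatus" with
        | some st =>
            [("speaker", (PySem.Dict.get? (PySem.Dict.mk last) "speaker").getD none),
             ("speakerstatus", st)]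
        | none => []   -- KeyError: excluded by Pre_
    | none => []   -- unreachable: sp ≠ []
  else
    [("speaker", none), ("speakerstatus", none)]

-- ===== PORT B =====
def lsiGo : List (List (String × Option String)) → List (String × Option String)
  | [] => [("speaker", none), ("speakerstatus", none)]
  | t :: rest =>
    if hasSpeaker t then
      [("speaker", (PySem.Dict.get? (PySem.Dict.mk t) "speaker").getD none),
       ("speakerstatus", (PySem.Dict.get? (PySem.Dict.mk t) "speakerstatus").getD none)]
    else lsiGo rest

def last_speaker_info_alt (turns : List (List (String × Option String))) : List (String × Option String) :=
  lsiGo turns.reverse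

-- ===== PRECONDITION & SPEC =====
-- Pre_ excludes exactly the inputs where the Python A raises KeyError: a turn without a
-- 'speaker' key, or a selected last turn without a 'speakerstatus' key.
def Pre_last_speaker_info (turns : List (List (String × Option String))) : Prop :=
  (∀ t ∈ turns, (PySem.Dict.get? (PySem.Dict.mk t) "speaker").isSome) ∧
  (∀ t ∈ (turns.filter hasSpeaker).getLast?, (PySem.Dict.get? (PySem.Dict.mk t) "speakerstatus").isSome)
instance (turns : List (List (String × Option String))) : Decidable (Pre_last_speaker_info turns) := by
  unfold Pre_last_speaker_info; infer_instance

def pvWitness_last_speaker_info : (List (List (String × Option String))) :=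
  [[("speaker", some "A"), ("speakerstatus", some "president")],
   [("speaker", none), ("speakerstatus", none)]]

def Spec_last_speaker_info (turns : List (List (String × Option String))) (out : List (String × Option String)) : Prop := out = last_speaker_info_alt turns
instance (turns : List (List (String × Option String))) (out : List (String × Option String)) : Decidable (Spec_last_speaker_info turns out) := by unfold Spec_last_speaker_info; infer_instance

-- ===== CLAIM (what is proved, stated in full; the proofs are below) =====
def Claim_equal_last_speaker_info : Prop := ∀ (turns : List (List (String × Option String))), Dom_last_speaker_info turns → Pre_last_speaker_info turns → Spec_last_speaker_info turns (last_speaker_info turns)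

-- ===== LEMMAS AND PROOFS =====

-- B's reverse scan computes the last element of A's filtered list.
theorem lsiGo_eq_filter (l : List (List (String × Option String))) :
    lsiGo l.reverse =
      match (l.filter hasSpeaker).getLast? with
      | some t => [("speaker", (PySem.Dict.get? (PySem.Dict.mk t) "speaker").getD none),
                   ("speakerstatus", (PySem.Dict.get? (PySem.Dict.mk t) "speakerstatus").getD none)]
      | none => [("speaker", none), ("speakerstatus", none)] := by
  induction l using List.reverseRecOn with
  | nil => simp [lsiGo]
  | append_singleton xs x ih =>
    by_cases h : hasSpeaker x
    · simp [lsiGo, List.filter_append, h]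
    · simpa [lsiGo, List.filter_append, h] using ih

-- ===== VERDICT (by name: the statement is the Claim_ definition above) =====
theorem last_speaker_info_spec : Claim_equal_last_speaker_info := by
  intro turns _ hpre
  unfold Spec_last_speaker_info last_speaker_info last_speaker_info_alt
  rw [lsiGo_eq_filter]
  by_cases h : turns.filter hasSpeaker = []
  · simp [h]
  · simp only [h, PySem.List.pyGet?_neg_one, ne_eq, not_false_iff, if_true]
    cases hl : (turns.filter hasSpeaker).getLast? with
    | none => exact absurd (List.getLast?_eq_none_iff.mp hl) h
    | some t =>
      have hst := hpre.2 t (by simp [hl])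
      cases hst2 : PySem.Dict.get? (PySem.Dict.mk t) "speakerstatus" with
      | none => rw [hst2] at hst; simp at hst
      | some st => simp [hst2]
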